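-- pv_equiv track=rewrite | github.com/Tsoftdev/formikaro | apps/FileCollector/tasks.py | processShopJSON
-- ===== SOURCE A (Python) =====
-- def processShopJSON(shop_json):
--     if not shop_json:
--         return False
--
--     this_json = {}
--     # raw_json = str(shop_json)
--     # raw_json = raw_json.replace("\'", "\"")
--     # raw_json = raw_json.replace("null", "\"null\"") # this is a hack! the api should deliver json conform values instead
--     # raw_json = raw_json.replace("None", "\"None\"")
--
--     try:
--         this_jsons = shop_json  # json.loads(raw_json)
--         custom_json = {}
--         k = 0
--
--         for i in range(len(this_jsons)):
--             label = this_jsons[i]['label'].upper()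
--
--             if label.find('RESOLUTION') == -1 and label.find('AUFLÖSUNG') == -1 and label.find('MUSIC') == -1 and label.find('MUSIK') == -1:
--                 key = "TEXT_" + str(k + 1)
--                 custom_json[key] = this_jsons[i]['value']
--                 k = k + 1
--     except:
--         return False
--
--     return custom_json
-- ===== SOURCE B (Python) =====
-- def _collect(items, base):
--     # divide & conquer: pairs [("TEXT_<base+1>", value), ...] for the kept
--     # items of `items`, plus the number of kept items
--     n = len(items)
--     if n == 0:
--         return [], 0
--     if n == 1:
--         item = items[0]
--         label = item['label'].upper()
--         for tok in ('RESOLUTION', 'AUFL\u00d6SUNG', 'MUSIC', 'MUSIK'):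
--             if tok in label:
--                 return [], 0
--         return [("TEXT_" + str(base + 1), item['value'])], 1
--     mid = n // 2
--     left, cl = _collect(items[:mid], base)
--     right, cr = _collect(items[mid:], base + cl)
--     return left + right, cl + cr
--
-- def processShopJSON(shop_json):
--     if not shop_json:
--         return False
--     try:
--         pairs, _ = _collect(shop_json, 0)
--         return dict(pairs)
--     except:
--         return False
-- ===== Notes on version B (the rewrite author's own statement) =====
-- stated objective: alternative
-- what changed: Replaced A's single left-to-right loop with a running counter and in-loop dict insertion by a divide-and-conquer recursion that splits the list in halves, builds key/value pair lists for each half (the right half's numbering offset by the left half's kept count), concatenates them and only at the top turns the pairs into a dict.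
import Mathlib
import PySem

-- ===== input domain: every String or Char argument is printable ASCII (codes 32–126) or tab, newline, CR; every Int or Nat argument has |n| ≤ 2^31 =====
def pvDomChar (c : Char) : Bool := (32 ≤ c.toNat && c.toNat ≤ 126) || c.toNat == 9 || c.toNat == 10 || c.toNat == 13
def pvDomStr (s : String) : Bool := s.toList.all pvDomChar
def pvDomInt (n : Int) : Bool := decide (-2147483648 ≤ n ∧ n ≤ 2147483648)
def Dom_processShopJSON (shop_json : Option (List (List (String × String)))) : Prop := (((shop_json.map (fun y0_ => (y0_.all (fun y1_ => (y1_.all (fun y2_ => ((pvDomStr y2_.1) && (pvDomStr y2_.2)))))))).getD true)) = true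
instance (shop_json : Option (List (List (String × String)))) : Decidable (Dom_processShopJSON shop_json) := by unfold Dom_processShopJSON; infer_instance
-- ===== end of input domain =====

-- ===== PORT A =====
-- One honest line: B replaces A's counter-carrying left-to-right loop by a divide-and-conquer
-- recursion that builds key/value pair lists for each half and makes the dict once at the top;
-- the Bool result is the truthiness of the Python return value (dict-or-False), as required here.
-- loop body of A (state = (custom_json, k); none = an exception was raised inside the try)
def pvBodyA (acc : Option (PySem.Dict String String × Int)) (row : List (String × String)) :
    Option (PySem.Dict String String × Int) :=
  match acc with
  | none => none
  | some (custom_json, k) =>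
    let item := PySem.Dict.mk row
    match PySem.Dict.get? item "label" with
    | none => none           -- KeyError 'label' → except → False
    | some lab =>
      let label := PySem.Str.upper lab
      if PySem.Str.find label "RESOLUTION" == -1 && PySem.Str.find label "AUFLÖSUNG" == -1
          && PySem.Str.find label "MUSIC" == -1 && PySem.Str.find label "MUSIK" == -1 then
        match PySem.Dict.get? item "value" with
        | none => none       -- KeyError 'value' → except → False
        | some v => some (custom_json.insert ("TEXT_" ++ PySem.Int.toStr (k + 1)) v, k + 1)
      else some (custom_json, k)

def processShopJSON (shop_json : Option (List (List (String × String)))) : Bool :=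
  match shop_json with
  | none => false                      -- `if not shop_json: return False` (None case)
  | some this_jsons =>
    if this_jsons.isEmpty then false   -- `if not shop_json` (empty-list case)
    else
      -- for i in range(len(this_jsons)): ... inside try/except (none = an exception was raised)
      let st :=
        (PySem.List.pyRange 0 (PySem.List.len this_jsons) 1).foldl
          (fun acc i => pvBodyA acc (PySem.List.pyGetD this_jsons i []))
          (some (PySem.Dict.empty, 0))
      match st with
      | none => false
      | some (custom_json, _) => custom_json.size != 0   -- truthiness of the returned dict

-- ===== PORT B =====
-- leaf of _collect: one item (none = a KeyError escaped, caught by the bare except)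
def pvLeafB (item : List (String × String)) (base : Int) :
    Option (List (String × String) × Int) :=
  match PySem.Dict.get? (PySem.Dict.mk item) "label" with
  | none => none
  | some lab =>
    let label := PySem.Str.upper lab
    if ["RESOLUTION", "AUFLÖSUNG", "MUSIC", "MUSIK"].any (fun tok => PySem.Str.isIn tok label) then
      some ([], 0)
    else
      match PySem.Dict.get? (PySem.Dict.mk item) "value" with
      | none => none
      | some v => some ([("TEXT_" ++ PySem.Int.toStr (base + 1), v)], 1)

-- _collect: divide & conquer; items[:mid] / items[mid:] with 0 ≤ mid ≤ len are List.take / List.drop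
def pvCollectB : List (List (String × String)) → Int → Option (List (String × String) × Int)
  | [], _ => some ([], 0)
  | [item], base => pvLeafB item base
  | a :: b :: rest, base =>
    let mid := (a :: b :: rest).length / 2
    match pvCollectB ((a :: b :: rest).take mid) base with
    | none => none
    | some (l, cl) =>
      match pvCollectB ((a :: b :: rest).drop mid) (base + cl) with
      | none => none
      | some (r, cr) => some (l ++ r, cl + cr)
termination_by items _ => items.length
decreasing_by
  · simp [List.length_take]; omega
  · simp; omega

def processShopJSON_alt (shop_json : Option (List (List (String × String)))) : Bool :=
  match shop_json with
  | none => false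
  | some js =>
    if js.isEmpty then false
    else
      match pvCollectB js 0 with
      | none => false                          -- bare except → False
      | some (pairs, _) =>
        (PySem.Dict.mk pairs).size != 0        -- truthiness of dict(pairs)

-- ===== PRECONDITION & SPEC =====
def Spec_processShopJSON (shop_json : Option (List (List (String × String)))) (out : Bool) : Prop := out = processShopJSON_alt shop_json
instance (shop_json : Option (List (List (String × String)))) (out : Bool) : Decidable (Spec_processShopJSON shop_json out) := by unfold Spec_processShopJSON; infer_instance

-- ===== CLAIM (what is proved, stated in full; the proofs are below) =====
def Claim_equal_processShopJSON : Prop := ∀ (shop_json : Option (List (List (String × String)))), Dom_processShopJSON shop_json → Spec_processShopJSON shop_json (processShopJSON shop_json)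

-- ===== LEMMAS AND PROOFS =====

-- the kept values of a list of items, left to right (none = a KeyError would escape)
def pvKeptB : List (List (String × String)) → Option (List String)
  | [] => some []
  | item :: rest =>
    let itemD := PySem.Dict.mk item
    match PySem.Dict.get? itemD "label" with
    | none => none
    | some lab =>
      let label := PySem.Str.upper lab
      if ["RESOLUTION", "AUFLÖSUNG", "MUSIC", "MUSIK"].any (fun tok => PySem.Str.isIn tok label) then
        pvKeptB rest
      else
        match PySem.Dict.get? itemD "value" with
        | none => none
        | some v => (pvKeptB rest).map (fun ks => v :: ks)

-- the pair list B produces for kept values, numbered from base+1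
def pvPairs (base : Int) : List String → List (String × String)
  | [] => []
  | v :: vs => ("TEXT_" ++ PySem.Int.toStr (base + 1), v) :: pvPairs (base + 1) vs

-- A's inserts, replayed on the kept-values list
def pvInsA (d : PySem.Dict String String) (k : Int) : List String → PySem.Dict String String
  | [] => d
  | v :: vs => pvInsA (d.insert ("TEXT_" ++ PySem.Int.toStr (k + 1)) v) (k + 1) vs

theorem pvFindIn (l t : String) : (PySem.Str.find l t == -1) = !(PySem.Str.isIn t l) := by
  by_cases h : t.toList <:+: l.toList
  · have h1 : PySem.Str.isIn t l = true := (PySem.Str.isIn_iff_infix t l).mpr h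
    have h2 : PySem.Str.find l t ≠ -1 := (PySem.Str.find_ne_neg_one_iff l t).mpr h
    rw [h1, Bool.not_true]
    exact beq_eq_false_iff_ne.mpr h2
  · have h1 : PySem.Str.isIn t l = false := by
      cases hv : PySem.Str.isIn t l
      · rfl
      · exact absurd ((PySem.Str.isIn_iff_infix t l).mp hv) h
    have h2 : PySem.Str.find l t = -1 := (PySem.Str.find_eq_neg_one_iff l t).mpr h
    rw [h1, h2, Bool.not_false, beq_self_eq_true]

theorem pvFoldA_none (js : List (List (String × String))) :
    js.foldl pvBodyA none = none := by
  induction js with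
  | nil => rfl
  | cons a rest ih => simpa [pvBodyA] using ih

-- A's loop computes exactly the kept values, inserted with the running counter
theorem pvMainA (js : List (List (String × String))) :
    ∀ (d : PySem.Dict String String) (k : Int),
    js.foldl pvBodyA (some (d, k)) =
      (pvKeptB js).map (fun kept => (pvInsA d k kept, k + (kept.length : Int))) := by
  induction js with
  | nil => intro d k; simp [pvKeptB, pvInsA]
  | cons item rest ih =>
    intro d k
    simp only [List.foldl_cons, pvBodyA, pvKeptB]
    cases hlab : PySem.Dict.get? (PySem.Dict.mk item) "label" with
    | none => simp [pvFoldA_none]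
    | some lab =>
      simp only []
      rw [pvFindIn, pvFindIn, pvFindIn, pvFindIn]
      by_cases hany : (["RESOLUTION", "AUFLÖSUNG", "MUSIC", "MUSIK"].any
          (fun tok => PySem.Str.isIn tok (PySem.Str.upper lab))) = true
      · have : (!PySem.Str.isIn "RESOLUTION" (PySem.Str.upper lab) &&
            !PySem.Str.isIn "AUFLÖSUNG" (PySem.Str.upper lab) &&
            !PySem.Str.isIn "MUSIC" (PySem.Str.upper lab) &&
            !PySem.Str.isIn "MUSIK" (PySem.Str.upper lab)) = false := by
          simp only [List.any, Bool.or_false] at hany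
          cases h1 : PySem.Str.isIn "RESOLUTION" (PySem.Str.upper lab) <;>
          cases h2 : PySem.Str.isIn "AUFLÖSUNG" (PySem.Str.upper lab) <;>
          cases h3 : PySem.Str.isIn "MUSIC" (PySem.Str.upper lab) <;>
          cases h4 : PySem.Str.isIn "MUSIK" (PySem.Str.upper lab) <;>
          simp_all
        rw [this]
        simp only [Bool.false_eq_true, if_false, hany, if_true]
        exact ih d k
      · have hne := hany
        have : (!PySem.Str.isIn "RESOLUTION" (PySem.Str.upper lab) &&
            !PySem.Str.isIn "AUFLÖSUNG" (PySem.Str.upper lab) &&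
            !PySem.Str.isIn "MUSIC" (PySem.Str.upper lab) &&
            !PySem.Str.isIn "MUSIK" (PySem.Str.upper lab)) = true := by
          simp only [List.any, Bool.or_false] at hne
          cases h1 : PySem.Str.isIn "RESOLUTION" (PySem.Str.upper lab) <;>
          cases h2 : PySem.Str.isIn "AUFLÖSUNG" (PySem.Str.upper lab) <;>
          cases h3 : PySem.Str.isIn "MUSIC" (PySem.Str.upper lab) <;>
          cases h4 : PySem.Str.isIn "MUSIK" (PySem.Str.upper lab) <;>
          simp_all
        rw [this]
        simp only [if_true, hany, Bool.false_eq_true, if_false]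
        cases hval : PySem.Dict.get? (PySem.Dict.mk item) "value" with
        | none => simp [pvFoldA_none]
        | some v =>
          simp only []
          rw [ih]
          cases hk : pvKeptB rest with
          | none => rfl
          | some ks =>
            simp only [Option.map_some]
            refine congrArg some ?_
            refine Prod.ext ?_ ?_
            · rfl
            · simp
              ring

theorem pvKeptB_append (l r : List (List (String × String))) :
    pvKeptB (l ++ r) = (pvKeptB l).bind (fun kl => (pvKeptB r).map (fun kr => kl ++ kr)) := by
  induction l with
  | nil =>
    simp only [List.nil_append, pvKeptB, Option.bind_some]
    cases pvKeptB r <;> simp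
  | cons item rest ih =>
    simp only [List.cons_append, pvKeptB, ih]
    cases PySem.Dict.get? (PySem.Dict.mk item) "label" with
    | none => rfl
    | some lab =>
      simp only []
      split
      · rfl
      · cases PySem.Dict.get? (PySem.Dict.mk item) "value" with
        | none => rfl
        | some v =>
          cases pvKeptB rest with
          | none => rfl
          | some ks =>
            cases pvKeptB r <;> simp

theorem pvPairs_append (kl : List String) :
    ∀ (base : Int) (kr : List String),
    pvPairs base (kl ++ kr) = pvPairs base kl ++ pvPairs (base + (kl.length : Int)) kr := by
  induction kl with
  | nil => intro base kr; simp [pvPairs]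
  | cons v vs ih =>
    intro base kr
    simp only [List.cons_append, pvPairs, ih (base + 1) kr, List.length_cons]
    have h : base + 1 + (vs.length : Int) = base + ((vs.length + 1 : Nat) : Int) := by
      push_cast; ring
    rw [h]

-- B's divide-and-conquer produces exactly the kept values' pair list with the right numbering
theorem pvCollect_spec_aux (n : Nat) :
    ∀ (items : List (List (String × String))), items.length ≤ n → ∀ (base : Int),
    pvCollectB items base =
      (pvKeptB items).map (fun kept => (pvPairs base kept, (kept.length : Int))) := by
  induction n with
  | zero =>
    intro items h base
    have : items = [] := List.length_eq_zero_iff.mp (Nat.le_zero.mp h)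
    subst this
    simp [pvCollectB, pvKeptB, pvPairs]
  | succ n ih =>
    intro items h base
    match items with
    | [] => simp [pvCollectB, pvKeptB, pvPairs]
    | [item] =>
      simp only [pvCollectB, pvLeafB, pvKeptB]
      cases PySem.Dict.get? (PySem.Dict.mk item) "label" with
      | none => rfl
      | some lab =>
        simp only []
        split
        · simp [pvPairs]
        · cases PySem.Dict.get? (PySem.Dict.mk item) "value" with
          | none => rfl
          | some v => simp [pvPairs]
    | a :: b :: rest =>
      have hlen : (a :: b :: rest).length = rest.length + 2 := by simp
      have hmid1 : ((a :: b :: rest).take ((a :: b :: rest).length / 2)).length ≤ n := by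
        simp only [List.length_take, hlen] at *
        omega
      have hmid2 : ((a :: b :: rest).drop ((a :: b :: rest).length / 2)).length ≤ n := by
        simp only [List.length_drop, hlen] at *
        omega
      rw [pvCollectB]
      rw [ih _ hmid1 base]
      conv_rhs =>
        rw [← List.take_append_drop ((a :: b :: rest).length / 2) (a :: b :: rest),
          pvKeptB_append]
      cases hl : pvKeptB ((a :: b :: rest).take ((a :: b :: rest).length / 2)) with
      | none => rfl
      | some kl =>
        simp only [Option.map_some, Option.bind_some]
        rw [ih _ hmid2 (base + (kl.length : Int))]
        cases hr : pvKeptB ((a :: b :: rest).drop ((a :: b :: rest).length / 2)) with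
        | none => rfl
        | some kr =>
          simp only [Option.map_some]
          refine congrArg some (Prod.ext ?_ ?_)
          · exact (pvPairs_append kl base kr).symm
          · simp

theorem pvCollect_spec (items : List (List (String × String))) (base : Int) :
    pvCollectB items base =
      (pvKeptB items).map (fun kept => (pvPairs base kept, (kept.length : Int))) :=
  pvCollect_spec_aux items.length items (le_refl _) base

theorem pvSize_insert_ne_zero {d : PySem.Dict String String} (a b : String) :
    (d.insert a b).size ≠ 0 := by
  rw [PySem.Dict.size_insert]
  split_ifs with h
  · intro h0
    have : d.items = [] := List.length_eq_zero_iff.mp h0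
    have hk := (PySem.Dict.contains_iff_mem_keys d a).mp h
    simp [PySem.Dict.keys, this] at hk
  · omega

theorem pvSize_insA_ne_zero (vs : List String) (d : PySem.Dict String String) (k : Int)
    (h : d.size ≠ 0) : (pvInsA d k vs).size ≠ 0 := by
  induction vs generalizing d k with
  | nil => simpa [pvInsA] using h
  | cons v vs ih => exact ih _ _ (pvSize_insert_ne_zero _ _)

theorem pvSize_mk_cons_ne_zero (p : String × String) (rest : List (String × String)) :
    (PySem.Dict.mk (p :: rest)).size ≠ 0 := by
  intro h0
  simp [PySem.Dict.size] at h0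

-- ===== VERDICT (by name: the statement is the Claim_ definition above) =====
theorem processShopJSON_spec : Claim_equal_processShopJSON := by
  intro shop_json _
  unfold Spec_processShopJSON
  cases shop_json with
  | none => rfl
  | some js =>
    simp only [processShopJSON, processShopJSON_alt]
    cases hE : js.isEmpty with
    | true => rfl
    | false =>
      rw [PySem.List.foldl_pyRange_zero_pyGetD js [] pvBodyA (some (PySem.Dict.empty, 0)),
        pvMainA js PySem.Dict.empty 0, pvCollect_spec js 0]
      cases hk : pvKeptB js with
      | none => rfl
      | some kept =>
        simp only [Option.map_some]
        cases kept with
        | nil => rfl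
        | cons v vs =>
          have h1 : (pvInsA PySem.Dict.empty 0 (v :: vs)).size ≠ 0 :=
            pvSize_insA_ne_zero vs _ _ (pvSize_insert_ne_zero _ _)
          have h2 : (PySem.Dict.mk (pvPairs 0 (v :: vs))).size ≠ 0 := by
            show (PySem.Dict.mk (("TEXT_" ++ PySem.Int.toStr (0 + 1), v) :: pvPairs (0 + 1) vs)).size ≠ 0
            exact pvSize_mk_cons_ne_zero _ _
          rw [bne_iff_ne.mpr h1, bne_iff_ne.mpr h2]
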